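-- pv_equiv track=rewrite | github.com/abeerkhan99/Taleem-Gah-School-Website | code/.venv/financials.py | get_info
-- ===== SOURCE A (Python) =====
-- def get_info(financial_data, date):
--     info = []
--     year = []
--
--     for csv_date in financial_data.items():
--         csv_info = csv_date[0]
--         y_m = csv_info.split("-")
--         info.append(y_m)
--         if y_m[0] not in year:
--             year.append(y_m[0])
--     year.sort()
--     return year
-- ===== SOURCE B (Python) =====
-- def get_info(financial_data, date):
--     prefixes = sorted(k.split("-")[0] for k in financial_data)
--     year = []
--     prev = None
--     for p in prefixes:
--         if prev is None or p != prev: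
--             year.append(p)
--             prev = p
--     return year
-- ===== Notes on version B (the rewrite author's own statement) =====
-- stated objective: faster
-- what changed: B sorts the full (duplicate-containing) list of year prefixes once and deduplicates by a single adjacency pass over the sorted list, instead of A's per-key linear membership scan of the growing year list followed by a sort of the deduplicated list.
import Mathlib
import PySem

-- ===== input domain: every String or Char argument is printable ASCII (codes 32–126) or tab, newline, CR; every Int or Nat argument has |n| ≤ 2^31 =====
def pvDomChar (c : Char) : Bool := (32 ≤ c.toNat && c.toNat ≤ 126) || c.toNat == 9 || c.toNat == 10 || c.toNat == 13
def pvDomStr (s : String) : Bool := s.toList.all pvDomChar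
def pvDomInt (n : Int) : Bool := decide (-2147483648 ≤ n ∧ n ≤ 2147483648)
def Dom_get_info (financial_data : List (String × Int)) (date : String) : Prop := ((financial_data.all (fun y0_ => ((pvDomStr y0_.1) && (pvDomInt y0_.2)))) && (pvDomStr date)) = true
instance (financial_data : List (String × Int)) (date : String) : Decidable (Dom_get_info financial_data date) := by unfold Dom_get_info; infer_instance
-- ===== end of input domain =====

-- B sorts the full duplicate-containing list of prefixes once and deduplicates by an adjacency pass, instead of
-- A's per-key linear membership scan followed by a sort of the dedup'd list (faster: avoids the quadratic scan).

-- ===== PORT A =====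
-- k.split("-")[0]: the separator "-" is nonempty so split? is always some, and a split list is never empty, so [0] never raises;
-- headD "" is exact here (the default is never taken).
def pvPrefix (s : String) : String := ((PySem.Str.split? s "-").getD []).headD ""

def get_info (financial_data : List (String × Int)) (date : String) : List String :=
  -- state = (info, year), exactly A's two accumulators (info is built but unused by the return)
  let st := financial_data.foldl
    (fun (st : List (List String) × List String) csv_date =>
      let y_m := (PySem.Str.split? csv_date.1 "-").getD []
      let info := st.1 ++ [y_m]
      if y_m.headD "" ∈ st.2 then (info, st.2) else (info, st.2 ++ [y_m.headD ""]))
    ([], [])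
  PySem.List.sorted st.2 (fun x => x) false

-- ===== PORT B =====
def get_info_alt (financial_data : List (String × Int)) (date : String) : List String :=
  let prefixes := PySem.List.sorted (financial_data.map (fun kv => pvPrefix kv.1)) (fun x => x) false
  (prefixes.foldl
    (fun (st : List String × Option String) p =>
      if st.2 = none ∨ st.2 ≠ some p then (st.1 ++ [p], some p) else st)
    ([], none)).1

-- ===== PRECONDITION & SPEC =====
def Spec_get_info (financial_data : List (String × Int)) (date : String) (out : List String) : Prop := out = get_info_alt financial_data date
instance (financial_data : List (String × Int)) (date : String) (out : List String) : Decidable (Spec_get_info financial_data date out) := by unfold Spec_get_info; infer_instance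

-- ===== CLAIM (what is proved, stated in full; the proofs are below) =====
def Claim_equal_get_info : Prop := ∀ (financial_data : List (String × Int)) (date : String), Dom_get_info financial_data date → Spec_get_info financial_data date (get_info financial_data date)

-- ===== LEMMAS AND PROOFS =====

-- A's year-accumulator, isolated from the (unused) info accumulator.
def pvDedupFirst (acc : List String) (l : List String) : List String :=
  l.foldl (fun year p => if p ∈ year then year else year ++ [p]) acc

theorem get_info_year_eq (fd : List (String × Int)) :
    ∀ (info : List (List String)) (year : List String),
      (fd.foldl
        (fun (st : List (List String) × List String) csv_date =>
          let y_m := (PySem.Str.split? csv_date.1 "-").getD []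
          let info := st.1 ++ [y_m]
          if y_m.headD "" ∈ st.2 then (info, st.2) else (info, st.2 ++ [y_m.headD ""]))
        (info, year)).2
      = pvDedupFirst year (fd.map (fun kv => pvPrefix kv.1)) := by
  induction fd with
  | nil => intro info year; simp [pvDedupFirst]
  | cons kv t ih =>
    intro info year
    simp only [List.foldl_cons, List.map_cons, pvDedupFirst, pvPrefix]
    split_ifs with h
    all_goals rw [ih]; rfl

theorem mem_pvDedupFirst (l : List String) :
    ∀ acc x, x ∈ pvDedupFirst acc l ↔ x ∈ acc ∨ x ∈ l := by
  induction l with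
  | nil => simp [pvDedupFirst]
  | cons p t ih =>
    intro acc x
    simp only [pvDedupFirst, List.foldl_cons]
    by_cases h : p ∈ acc
    · rw [if_pos h,
        show (t.foldl (fun year p => if p ∈ year then year else year ++ [p]) acc) = pvDedupFirst acc t from rfl,
        ih]
      simp only [List.mem_cons]
      constructor
      · tauto
      · rintro (hx | rfl | hx) <;> tauto
    · rw [if_neg h,
        show (t.foldl (fun year p => if p ∈ year then year else year ++ [p]) (acc ++ [p])) = pvDedupFirst (acc ++ [p]) t from rfl,
        ih]
      simp only [List.mem_append, List.mem_cons]
      tauto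

theorem nodup_pvDedupFirst (l : List String) :
    ∀ acc, acc.Nodup → (pvDedupFirst acc l).Nodup := by
  induction l with
  | nil => intro acc h; simpa [pvDedupFirst] using h
  | cons p t ih =>
    intro acc hacc
    simp only [pvDedupFirst, List.foldl_cons]
    by_cases h : p ∈ acc
    · rw [if_pos h]; exact ih acc hacc
    · rw [if_neg h]
      refine ih (acc ++ [p]) ?_
      rw [List.nodup_append]
      refine ⟨hacc, List.nodup_singleton p, ?_⟩
      intro a ha b hb
      simp only [List.mem_singleton] at hb
      subst hb
      exact fun hab => h (hab ▸ ha)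

-- B's adjacency pass, as a recursive function.
def pvDAdj : Option String → List String → List String
  | _, [] => []
  | prev, x :: t => if prev = none ∨ prev ≠ some x then x :: pvDAdj (some x) t else pvDAdj prev t

theorem foldl_eq_pvDAdj (l : List String) :
    ∀ (out : List String) (prev : Option String),
      (l.foldl
        (fun (st : List String × Option String) p =>
          if st.2 = none ∨ st.2 ≠ some p then (st.1 ++ [p], some p) else st)
        (out, prev)).1
      = out ++ pvDAdj prev l := by
  induction l with
  | nil => simp [pvDAdj]
  | cons x t ih =>
    intro out prev
    simp only [List.foldl_cons, pvDAdj]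
    by_cases h : prev = none ∨ prev ≠ some x
    · simp [h, ih]
    · simp [h, ih]

theorem mem_pvDAdj (l : List String) :
    ∀ (prev : Option String), l.Pairwise (· ≤ ·) →
      (∀ q, prev = some q → ∀ y ∈ l, q ≤ y) →
      ∀ x, x ∈ pvDAdj prev l ↔ x ∈ l ∧ prev ≠ some x := by
  induction l with
  | nil => simp [pvDAdj]
  | cons a t ih =>
    intro prev hp hb x
    have hpt : t.Pairwise (· ≤ ·) := hp.tail
    have hat : ∀ y ∈ t, a ≤ y := fun y hy => (List.pairwise_cons.mp hp).1 y hy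
    by_cases h : prev = some a
    · subst h
      have hcond : ¬ (some a = none ∨ some a ≠ some a) := by simp
      rw [show pvDAdj (some a) (a :: t)
            = if some a = none ∨ some a ≠ some a then a :: pvDAdj (some a) t else pvDAdj (some a) t from rfl,
        if_neg hcond,
        ih (some a) hpt (fun q hq y hy => by cases hq; exact hb _ rfl y (List.mem_cons_of_mem _ hy)) x]
      constructor
      · rintro ⟨hx, hne⟩; exact ⟨List.mem_cons_of_mem _ hx, hne⟩
      · rintro ⟨hx, hne⟩
        rcases List.mem_cons.mp hx with rfl | hx
        · exact (hne rfl).elim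
        · exact ⟨hx, hne⟩
    · have hcond : prev = none ∨ prev ≠ some a := by
        cases prev with
        | none => exact Or.inl rfl
        | some q => exact Or.inr h
      rw [show pvDAdj prev (a :: t)
            = if prev = none ∨ prev ≠ some a then a :: pvDAdj (some a) t else pvDAdj prev t from rfl,
        if_pos hcond, List.mem_cons,
        ih (some a) hpt (fun q hq y hy => by cases hq; exact hat y hy) x]
      constructor
      · rintro (rfl | ⟨hx, hne⟩)
        · exact ⟨by simp, h⟩
        · refine ⟨List.mem_cons_of_mem _ hx, ?_⟩
          cases prev with
          | none => simp
          | some q =>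
            have hqa : q ≤ a := hb q rfl a (by simp)
            have hax : a ≤ x := hat x hx
            intro hqx
            have hqx' : q = x := Option.some.inj hqx
            exact hne (congrArg some (le_antisymm hax (hqx' ▸ hqa)))
      · rintro ⟨hx, hne⟩
        rcases List.mem_cons.mp hx with rfl | hx
        · exact Or.inl rfl
        · by_cases hxa : x = a
          · exact Or.inl hxa
          · exact Or.inr ⟨hx, fun hh => hxa (Option.some.inj hh).symm⟩

theorem pairwise_pvDAdj (l : List String) :
    ∀ (prev : Option String), l.Pairwise (· ≤ ·) →
      (∀ q, prev = some q → ∀ y ∈ l, q ≤ y) →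
      (pvDAdj prev l).Pairwise (· < ·) := by
  induction l with
  | nil => simp [pvDAdj]
  | cons a t ih =>
    intro prev hp hb
    have hpt : t.Pairwise (· ≤ ·) := hp.tail
    have hat : ∀ y ∈ t, a ≤ y := fun y hy => (List.pairwise_cons.mp hp).1 y hy
    have hbt : ∀ q, some a = some q → ∀ y ∈ t, q ≤ y := fun q hq y hy => by cases hq; exact hat y hy
    by_cases h : prev = some a
    · subst h
      have hcond : ¬ (some a = none ∨ some a ≠ some a) := by simp
      rw [show pvDAdj (some a) (a :: t)
            = if some a = none ∨ some a ≠ some a then a :: pvDAdj (some a) t else pvDAdj (some a) t from rfl,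
        if_neg hcond]
      exact ih (some a) hpt (fun q hq y hy => by cases hq; exact hb _ rfl y (List.mem_cons_of_mem _ hy))
    · have hcond : prev = none ∨ prev ≠ some a := by
        cases prev with
        | none => exact Or.inl rfl
        | some q => exact Or.inr h
      rw [show pvDAdj prev (a :: t)
            = if prev = none ∨ prev ≠ some a then a :: pvDAdj (some a) t else pvDAdj prev t from rfl,
        if_pos hcond]
      refine List.pairwise_cons.mpr ⟨?_, ih (some a) hpt hbt⟩
      intro y hy
      obtain ⟨hyt, hne⟩ := (mem_pvDAdj t (some a) hpt hbt y).mp hy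
      exact lt_of_le_of_ne (hat y hyt) (fun hh => hne (congrArg some hh))

-- ===== VERDICT (by name: the statement is the Claim_ definition above) =====
theorem get_info_spec : Claim_equal_get_info := by
  intro fd date _
  unfold Spec_get_info get_info get_info_alt
  simp only []
  set pre := fd.map (fun kv => pvPrefix kv.1) with hpre
  have hA : (fd.foldl
      (fun (st : List (List String) × List String) csv_date =>
        let y_m := (PySem.Str.split? csv_date.1 "-").getD []
        let info := st.1 ++ [y_m]
        if y_m.headD "" ∈ st.2 then (info, st.2) else (info, st.2 ++ [y_m.headD ""]))
      ([], [])).2 = pvDedupFirst [] pre := get_info_year_eq fd [] []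
  rw [hA]
  set s := PySem.List.sorted pre (fun x => x) false with hs
  have hsp : s.Pairwise (· ≤ ·) := by
    simpa using PySem.List.sorted_pairwise pre (fun x => x)
  have hb0 : ∀ q, (none : Option String) = some q → ∀ y ∈ s, q ≤ y := by simp
  rw [foldl_eq_pvDAdj s [] none, List.nil_append]
  apply PySem.List.sorted_eq_of_perm_of_pairwise_lt
  · -- pvDAdj none s ~ pvDedupFirst [] pre
    have hmem : ∀ x, x ∈ pvDAdj none s ↔ x ∈ pvDedupFirst [] pre := by
      intro x
      rw [mem_pvDAdj s none hsp hb0 x, mem_pvDedupFirst pre [] x]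
      simp [hs, PySem.List.mem_sorted]
    have hn1 : (pvDAdj none s).Nodup :=
      (pairwise_pvDAdj s none hsp hb0).imp (fun h => ne_of_lt h)
    have hn2 : (pvDedupFirst [] pre).Nodup := nodup_pvDedupFirst pre [] (by simp)
    exact (List.perm_ext_iff_of_nodup hn1 hn2).mpr hmem
  · simpa using pairwise_pvDAdj s none hsp hb0
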